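-- pv_equiv track=rewrite | github.com/Aiven-Labs/typing-at-scale | mypy_report.py | convert_mypy_module_to_path_re
-- ===== SOURCE A (Python) =====
-- def convert_mypy_module_to_path_re(s: str) -> str:
--     if "." not in s:
--         # Special snowflake case: non python module hierarchy member that can be .. anywhere.
--         return "(?:.*/)?" + s + r"\.py$"
--
--     # A pattern of the form qualified_module_name matches only the
--     # named module, while dotted_module_name.* matches
--     # dotted_module_name and any submodules (so foo.bar.* would match
--     # all of foo.bar, foo.bar.baz, and foo.bar.baz.quux).
--     if s.startswith("*."):
--         return "(?:.*/)?" + convert_mypy_module_to_path_re(s.removeprefix("*."))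
--
--     # Stuff in the middle can be 'whatever'
--     s = s.replace(".", "/")
--
--     # .*. (rewritten to /*/) means arbitrary 0-N component match
--     s = s.replace("/*/", "(?:/.*)?/")
--
--     # Wildcard at end covers both the module itself, as well as any submodules.
--     if s.endswith("/*"):
--         s = s.removesuffix("/*")
--
--         # This can be just that particular Python module, or something within
--         return s + r"(?:/.*|)\.py$"
--
--     # If we just hit the module, that's fine too
--     return s + r"(?:/[^/]+|)\.py$"
-- ===== SOURCE B (Python) =====
-- def convert_mypy_module_to_path_re(s: str) -> str:
--     # Iteratively strip the '*.' prefixes, counting them, then transform the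
--     # remaining pattern once and prepend the counted prefixes.
--     k = 0
--     while s.startswith("*."):
--         s = s[2:]
--         k += 1
--     if "." not in s:
--         core = "(?:.*/)?" + s + r"\.py$"
--     else:
--         t = s.replace(".", "/").replace("/*/", "(?:/.*)?/")
--         if t.endswith("/*"):
--             core = t[:-2] + r"(?:/.*|)\.py$"
--         else:
--             core = t + r"(?:/[^/]+|)\.py$"
--     return "(?:.*/)?" * k + core
-- ===== Notes on version B (the rewrite author's own statement) =====
-- stated objective: alternative
-- what changed: Replaces the self-recursion over '*.' prefixes by an explicit stripping loop with a counter, then applies the core transformation once and prepends the counted '(?:.*/)?' prefixes.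
import Mathlib
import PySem

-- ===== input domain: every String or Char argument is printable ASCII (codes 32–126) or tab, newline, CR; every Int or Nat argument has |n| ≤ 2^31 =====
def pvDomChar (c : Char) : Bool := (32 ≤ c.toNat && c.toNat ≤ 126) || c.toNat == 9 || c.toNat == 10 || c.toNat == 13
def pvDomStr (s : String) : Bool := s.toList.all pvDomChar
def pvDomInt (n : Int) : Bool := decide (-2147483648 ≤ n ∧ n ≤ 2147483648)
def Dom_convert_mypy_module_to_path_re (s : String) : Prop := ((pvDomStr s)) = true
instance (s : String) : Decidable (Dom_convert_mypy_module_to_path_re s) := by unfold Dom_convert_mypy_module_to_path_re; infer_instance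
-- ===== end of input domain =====

-- B turns A's self-recursion over '*.' prefixes into a stripping loop with a counter
-- followed by ONE application of the core transformation (alternative decomposition).

-- ===== PORT A =====
-- l.drop 2 is s.removeprefix("*.") under the established startswith test
def pvConvA (l : List Char) : String :=
  if PySem.Chars.isIn ['.'] l = false then
    "(?:.*/)?" ++ String.ofList l ++ "\\.py$"
  else if h : PySem.Chars.startswith l ['*', '.'] then
    "(?:.*/)?" ++ pvConvA (l.drop 2)
  else
    let s1 := PySem.Chars.replace l ['.'] ['/']
    let s2 := PySem.Chars.replace s1 ['/', '*', '/'] "(?:/.*)?/".toList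
    if PySem.Chars.endswith s2 ['/', '*'] then
      String.ofList (s2.take (s2.length - 2)) ++ "(?:/.*|)\\.py$"
    else
      String.ofList s2 ++ "(?:/[^/]+|)\\.py$"
termination_by l.length
decreasing_by
  have := (PySem.Chars.startswith_iff l ['*', '.']).mp h
  have h2 : 2 ≤ l.length := by
    have := this.length_le; simpa using this
  simp [List.length_drop]; omega

def convert_mypy_module_to_path_re (s : String) : String := pvConvA s.toList

-- ===== PORT B =====
-- the 'while s.startswith("*."):' loop: returns (number of stripped prefixes, rest)
def pvStripB (l : List Char) : Nat × List Char :=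
  if h : PySem.Chars.startswith l ['*', '.'] then
    let p := pvStripB (l.drop 2)
    (p.1 + 1, p.2)
  else
    (0, l)
termination_by l.length
decreasing_by
  have := (PySem.Chars.startswith_iff l ['*', '.']).mp h
  have h2 : 2 ≤ l.length := by
    have := this.length_le; simpa using this
  simp [List.length_drop]; omega

def pvCoreB (l : List Char) : String :=
  if PySem.Chars.isIn ['.'] l = false then
    "(?:.*/)?" ++ String.ofList l ++ "\\.py$"
  else
    let t := PySem.Chars.replace (PySem.Chars.replace l ['.'] ['/']) ['/', '*', '/'] "(?:/.*)?/".toList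
    if PySem.Chars.endswith t ['/', '*'] then
      String.ofList (t.take (t.length - 2)) ++ "(?:/.*|)\\.py$"
    else
      String.ofList t ++ "(?:/[^/]+|)\\.py$"

-- "(?:.*/)?" * k
def pvRep : Nat → String
  | 0 => ""
  | k + 1 => "(?:.*/)?" ++ pvRep k

def convert_mypy_module_to_path_re_alt (s : String) : String :=
  let p := pvStripB s.toList
  pvRep p.1 ++ pvCoreB p.2

-- ===== PRECONDITION & SPEC =====
def Spec_convert_mypy_module_to_path_re (s : String) (out : String) : Prop := out = convert_mypy_module_to_path_re_alt s
instance (s : String) (out : String) : Decidable (Spec_convert_mypy_module_to_path_re s out) := by unfold Spec_convert_mypy_module_to_path_re; infer_instance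

-- ===== CLAIM (what is proved, stated in full; the proofs are below) =====
def Claim_equal_convert_mypy_module_to_path_re : Prop := ∀ (s : String), Dom_convert_mypy_module_to_path_re s → Spec_convert_mypy_module_to_path_re s (convert_mypy_module_to_path_re s)

-- ===== LEMMAS AND PROOFS =====

-- if l starts with "*." then '.' is in l
theorem pv_dot_of_starts (l : List Char) (h : PySem.Chars.startswith l ['*', '.'] = true) :
    PySem.Chars.isIn ['.'] l = true := by
  rcases (PySem.Chars.startswith_iff l ['*', '.']).mp h with ⟨t, rfl⟩
  exact (PySem.Chars.isIn_iff_infix _ _).mpr ⟨['*'], t, rfl⟩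

theorem pvConvA_eq (l : List Char) :
    pvConvA l = pvRep (pvStripB l).1 ++ pvCoreB (pvStripB l).2 := by
  induction l using pvConvA.induct with
  | case1 l hdot =>
      have hns : ¬ PySem.Chars.startswith l ['*', '.'] = true := by
        intro h; rw [pv_dot_of_starts l h] at hdot; simp at hdot
      rw [pvConvA, pvStripB]
      simp [hdot, hns, pvCoreB, pvRep]
  | case2 l hdot hs ih =>
      rw [pvConvA, pvStripB]
      simp only [hdot, hs, dif_pos]
      rw [ih]
      simp [pvRep, String.append_assoc]
  | case3 l hdot hns =>
      rw [pvConvA, pvStripB]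
      simp [hdot, hns, pvCoreB, pvRep]
  | case4 l hdot hns =>
      rw [pvConvA, pvStripB]
      simp [hdot, hns, pvCoreB, pvRep]

-- ===== VERDICT (by name: the statement is the Claim_ definition above) =====
theorem convert_mypy_module_to_path_re_spec : Claim_equal_convert_mypy_module_to_path_re := by
  intro s _
  unfold Spec_convert_mypy_module_to_path_re convert_mypy_module_to_path_re convert_mypy_module_to_path_re_alt
  exact pvConvA_eq s.toList
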